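-- pv_equiv track=rewrite | github.com/krystianz27/pp1 | 13-Test3/mock3/p4.py | f
-- ===== SOURCE A (Python) =====
-- def f(d):
--     dic = {}
--     for x in d:
--         dic[x[0]] = dic.get(x[0], 0) + 1
--
--     car1 = []
--     for x, y in dic.items():
--         if y % 2 == 1:
--             car1.append(x)
--     car1.sort()
--
--     return car1
-- ===== SOURCE B (Python) =====
-- def f(d):
--     odd = set()
--     for x in d:
--         k = x[0]
--         if k in odd:
--             odd.discard(k)
--         else:
--             odd.add(k)
--     return sorted(odd)
-- ===== Notes on version B (the rewrite author's own statement) =====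
-- stated objective: simpler
-- what changed: Replaces the count-dict plus a separate odd-count filter pass with a single pass that toggles each first-character in a parity set, then sorts the set.
import Mathlib
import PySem

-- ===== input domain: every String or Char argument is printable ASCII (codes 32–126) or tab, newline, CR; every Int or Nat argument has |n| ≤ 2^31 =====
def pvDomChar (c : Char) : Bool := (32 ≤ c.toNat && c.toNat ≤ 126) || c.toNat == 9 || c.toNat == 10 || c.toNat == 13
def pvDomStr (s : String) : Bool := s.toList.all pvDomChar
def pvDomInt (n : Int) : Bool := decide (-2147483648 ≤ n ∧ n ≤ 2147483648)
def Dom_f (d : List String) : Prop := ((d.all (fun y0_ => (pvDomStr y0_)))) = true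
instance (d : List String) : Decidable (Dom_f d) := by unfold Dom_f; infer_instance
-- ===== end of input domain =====

-- B replaces the count-dict plus a separate odd-filter pass with one toggling parity set, then sorts it (objective: simpler).

-- ===== PORT A =====
-- x[0] as a one-character string; the `none` arm is unreachable under Pre_f (Python raises IndexError there)
def keyOf (x : String) : String :=
  match PySem.Str.pyGet? x 0 with
  | some c => String.ofList [c]
  | none => ""

def f (d : List String) : List String :=
  let dic : PySem.Dict String Int :=
    d.foldl (fun dic x => dic.insert (keyOf x) (dic.getD (keyOf x) 0 + 1)) PySem.Dict.empty
  let car1 : List String :=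
    dic.items.foldl (fun car1 p => if PySem.Int.mod p.2 2 = 1 then car1 ++ [p.1] else car1) []
  PySem.List.sorted car1 id

-- ===== PORT B =====
def f_alt (d : List String) : List String :=
  let odd : PySem.Set String :=
    d.foldl (fun s x =>
      if s.contains (keyOf x) then PySem.Set.discard s (keyOf x) else PySem.Set.add s (keyOf x))
      PySem.Set.empty
  PySem.List.sorted odd id

-- ===== PRECONDITION & SPEC =====
-- Pre_f excludes lists containing the empty string, on which both Pythons raise IndexError at x[0].
def Pre_f (d : List String) : Prop := ∀ s ∈ d, s ≠ ""
instance (d : List String) : Decidable (Pre_f d) := by unfold Pre_f; infer_instance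

def pvWitness_f : List String := ["ab", "ac", "ba"]

def Spec_f (d : List String) (out : List String) : Prop := out = f_alt d
instance (d : List String) (out : List String) : Decidable (Spec_f d out) := by unfold Spec_f; infer_instance

-- ===== CLAIM (what is proved, stated in full; the proofs are below) =====
def Claim_equal_f : Prop := ∀ (d : List String), Dom_f d → Pre_f d → Spec_f d (f d)

-- ===== LEMMAS AND PROOFS =====

-- the toggle step of B
def tglStep (s : PySem.Set String) (k : String) : PySem.Set String :=
  if s.contains k then PySem.Set.discard s k else PySem.Set.add s k

lemma mem_tglStep (s : PySem.Set String) (k a : String) :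
    a ∈ tglStep s k ↔ (if a = k then a ∉ s else a ∈ s) := by
  unfold tglStep
  by_cases hc : s.contains k
  · have hk : k ∈ s := by simpa using hc
    simp only [hc, if_true, PySem.Set.mem_discard]
    by_cases hak : a = k <;> simp [hak, hk]
  · have hk : k ∉ s := by simpa using hc
    simp only [hc, Bool.false_eq_true, if_false, PySem.Set.mem_add]
    by_cases hak : a = k <;> simp [hak, hk]

lemma nodup_tglStep (s : PySem.Set String) (k : String) (hs : s.Nodup) :
    (tglStep s k).Nodup := by
  unfold tglStep
  split
  · exact PySem.Set.nodup_discard s k hs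
  · exact PySem.Set.nodup_add s k hs

lemma tgl_invariant (ks : List String) (s : PySem.Set String) (hs : s.Nodup) :
    (ks.foldl tglStep s).Nodup ∧
    ∀ a, a ∈ ks.foldl tglStep s ↔ (if ks.count a % 2 = 1 then a ∉ s else a ∈ s) := by
  induction ks generalizing s with
  | nil =>
    refine ⟨hs, fun a => ?_⟩
    simp
  | cons k ks ih =>
    have hstep := nodup_tglStep s k hs
    obtain ⟨hnd, hmem⟩ := ih (tglStep s k) hstep
    refine ⟨hnd, fun a => ?_⟩
    rw [List.foldl_cons, hmem a, mem_tglStep s k a]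
    rcases eq_or_ne a k with hak | hak
    · subst hak
      have hcnt : (a :: ks).count a = ks.count a + 1 := by simp
      rw [hcnt]
      by_cases h1 : ks.count a % 2 = 1
      · have h2 : (ks.count a + 1) % 2 ≠ 1 := by omega
        simp [h1, h2]
      · have h2 : (ks.count a + 1) % 2 = 1 := by omega
        simp [h1, h2]
    · have hcnt : (k :: ks).count a = ks.count a := by simp [Ne.symm hak]
      rw [hcnt]
      split <;> simp

-- A's counting loop characterised: keys and values
lemma dicA_keys (ks : List String) :
    (ks.foldl (fun dic k => dic.insert k (dic.getD k 0 + 1)) (PySem.Dict.empty : PySem.Dict String Int)).keys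
      = PySem.Set.ofList ks := by
  rw [PySem.Dict.keys_foldl_insert ks (fun d k => d.getD k 0 + 1) PySem.Dict.empty]
  simp [PySem.Set.update, PySem.Set.ofList, PySem.Dict.keys, PySem.Dict.empty, PySem.Set.empty]

lemma dicA_getD (ks : List String) (v : String) :
    (ks.foldl (fun dic k => dic.insert k (dic.getD k 0 + 1)) (PySem.Dict.empty : PySem.Dict String Int)).getD v 0
      = (ks.count v : Int) := by
  rw [PySem.Dict.getD_foldl_insert_add_one, PySem.Dict.getD_empty]; ring

lemma oddInt_iff (n : Nat) : PySem.Int.mod (n : Int) 2 = 1 ↔ n % 2 = 1 := by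
  have h := PySem.Int.mod_natCast n 2
  constructor
  · intro h1; rw [show ((2:Int)) = ((2:Nat):Int) by norm_num, h] at h1; exact_mod_cast h1
  · intro h1; rw [show ((2:Int)) = ((2:Nat):Int) by norm_num, h, h1]; norm_num

-- A's result is the sorted odd-count keys; B's result is the sorted toggle set; they are permutations.
lemma main_lemma (d : List String) : f d = f_alt d := by
  unfold f f_alt
  simp only []
  set ks := d.map keyOf with hks
  have hfold : d.foldl (fun dic x => dic.insert (keyOf x) (dic.getD (keyOf x) 0 + 1))
      (PySem.Dict.empty : PySem.Dict String Int)
      = ks.foldl (fun dic k => dic.insert k (dic.getD k 0 + 1)) PySem.Dict.empty := by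
    rw [hks, List.foldl_map]
  have hbfold : d.foldl (fun s x =>
        if s.contains (keyOf x) then PySem.Set.discard s (keyOf x) else PySem.Set.add s (keyOf x))
      (PySem.Set.empty : PySem.Set String)
      = ks.foldl tglStep PySem.Set.empty := by
    rw [hks, List.foldl_map]; rfl
  rw [hfold, hbfold]
  set dic := ks.foldl (fun dic k => dic.insert k (dic.getD k 0 + 1))
      (PySem.Dict.empty : PySem.Dict String Int) with hdic
  have hkeysnodup : dic.keys.Nodup := by
    rw [hdic, dicA_keys]; exact PySem.Set.nodup_ofList ks
  have hitems : dic.items = dic.keys.map (fun k => (k, dic.getD k 0)) :=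
    PySem.Dict.items_eq_map_keys dic hkeysnodup 0
  -- A's filter loop
  have hif := PySem.List.foldl_append_if (fun (p : String × Int) => decide (PySem.Int.mod p.2 2 = 1)) Prod.fst dic.items []
  simp only [decide_eq_true_eq, List.nil_append] at hif
  rw [hif]
  have hcar : (dic.items.filter (fun p => decide (PySem.Int.mod p.2 2 = 1))).map Prod.fst
      = dic.keys.filter (fun k => decide (ks.count k % 2 = 1)) := by
    rw [hitems, List.filter_map, List.map_map]
    have : List.map (Prod.fst ∘ fun k => (k, dic.getD k 0)) = List.map id := by
      funext l; congr 1
    rw [this, List.map_id]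
    congr 1
    funext k
    simp only [Function.comp]
    congr 1
    rw [hdic, dicA_getD]
    exact propext (oddInt_iff (ks.count k))
  rw [hcar]
  -- permutation argument
  obtain ⟨hndB, hmemB⟩ := tgl_invariant ks PySem.Set.empty (by simp [PySem.Set.empty])
  apply PySem.List.sorted_eq_sorted_of_perm _ _ id Function.injective_id
  rw [List.perm_ext_iff_of_nodup (List.Nodup.filter _ hkeysnodup) hndB]
  intro a
  rw [List.mem_filter, hmemB a, hdic, dicA_keys, PySem.Set.mem_ofList]
  constructor
  · rintro ⟨_, hodd⟩
    simp only [decide_eq_true_eq] at hodd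
    simp [hodd, PySem.Set.empty]
  · intro h
    by_cases hodd : ks.count a % 2 = 1
    · refine ⟨?_, by simpa using hodd⟩
      have : ks.count a ≠ 0 := by omega
      exact List.count_pos_iff.mp (Nat.pos_of_ne_zero this)
    · simp [hodd, PySem.Set.empty] at h

-- ===== VERDICT (by name: the statement is the Claim_ definition above) =====
theorem f_spec : Claim_equal_f := by
  intro d _ _
  unfold Spec_f
  exact main_lemma d
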